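-- pv_equiv track=rewrite | github.com/bmarcote/evn_postprocess | evn_postprocess/environment.py | extract_tail_standardplots_output
-- ===== SOURCE A (Python) =====
-- def extract_tail_standardplots_output(stdplt_output):
--     """Given a full log output from standardplots, it returns only the last bits that contain
--     the information provided by the "r" command.
--     """
--     last_lines = []
--     for a_line in stdplt_output.split('\n')[::-1]:
--         # All "r" output lines always start with those messages
--         # (listTimeRage: , listSources: , listAntennas: , listFreqs: ):
--         if 'list' in a_line:
--             last_lines.append(f"# {a_line}")
--         elif 'ms: Current' in a_line:
--             # We are already done for this output
--             break
--     last_lines.append('\n')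
--
--     return '\n'.join(last_lines[::-1])
-- ===== SOURCE B (Python) =====
-- def extract_tail_standardplots_output(stdplt_output):
--     """Forward single pass: collect 'list' lines, reset on 'ms: Current'."""
--     acc = []
--     for a_line in stdplt_output.split('\n'):
--         if 'list' in a_line:
--             acc.append(f"# {a_line}")
--         elif 'ms: Current' in a_line:
--             acc = []
--     return '\n'.join(['\n'] + acc)
-- ===== Notes on version B (the rewrite author's own statement) =====
-- stated objective: simpler
-- what changed: Replaced the reverse scan with break plus two list reversals by a single forward pass that resets the accumulator whenever a terminator line is seen, so no reversal is needed.
import Mathlib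
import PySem

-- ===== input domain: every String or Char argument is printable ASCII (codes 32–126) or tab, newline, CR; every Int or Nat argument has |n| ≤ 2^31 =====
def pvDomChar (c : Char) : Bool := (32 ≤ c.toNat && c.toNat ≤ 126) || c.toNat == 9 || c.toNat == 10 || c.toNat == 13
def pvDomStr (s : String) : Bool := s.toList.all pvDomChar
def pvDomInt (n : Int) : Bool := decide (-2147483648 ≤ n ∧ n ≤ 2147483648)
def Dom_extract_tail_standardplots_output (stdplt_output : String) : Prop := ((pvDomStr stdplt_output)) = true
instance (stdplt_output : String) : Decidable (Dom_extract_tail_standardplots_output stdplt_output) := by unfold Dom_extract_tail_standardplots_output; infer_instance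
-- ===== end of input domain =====

-- B replaces A's reverse scan with break (and two reversals) by one forward pass that
-- resets the accumulator at each terminator line; objective: simpler.

-- ===== PORT A =====
-- the for-loop over the reversed lines, with break ('ms: Current' branch returns acc)
def pvA_loop : List String → List String → List String
  | acc, [] => acc
  | acc, l :: rest =>
      if PySem.Str.isIn "list" l then pvA_loop (acc ++ ["# " ++ l]) rest
      else if PySem.Str.isIn "ms: Current" l then acc
      else pvA_loop acc rest

def extract_tail_standardplots_output (stdplt_output : String) : String :=
  let lines := (PySem.Str.split? stdplt_output "\n").getD []
  let last_lines := pvA_loop [] ((PySem.List.slice? lines none none (-1)).getD [])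
  PySem.Str.join "\n" ((PySem.List.slice? (last_lines ++ ["\n"]) none none (-1)).getD [])

-- ===== PORT B =====
def pvB_step (acc : List String) (l : String) : List String :=
  if PySem.Str.isIn "list" l then acc ++ ["# " ++ l]
  else if PySem.Str.isIn "ms: Current" l then []
  else acc

def extract_tail_standardplots_output_alt (stdplt_output : String) : String :=
  PySem.Str.join "\n" ("\n" :: ((PySem.Str.split? stdplt_output "\n").getD []).foldl pvB_step [])

-- ===== PRECONDITION & SPEC =====
def Spec_extract_tail_standardplots_output (stdplt_output : String) (out : String) : Prop := out = extract_tail_standardplots_output_alt stdplt_output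
instance (stdplt_output : String) (out : String) : Decidable (Spec_extract_tail_standardplots_output stdplt_output out) := by unfold Spec_extract_tail_standardplots_output; infer_instance

-- ===== CLAIM (what is proved, stated in full; the proofs are below) =====
def Claim_equal_extract_tail_standardplots_output : Prop := ∀ (stdplt_output : String), Dom_extract_tail_standardplots_output stdplt_output → Spec_extract_tail_standardplots_output stdplt_output (extract_tail_standardplots_output stdplt_output)

-- ===== LEMMAS AND PROOFS =====
theorem pvA_loop_acc (R : List String) : ∀ acc, pvA_loop acc R = acc ++ pvA_loop [] R := by
  induction R with
  | nil => intro acc; simp [pvA_loop]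
  | cons l rest ih =>
      intro acc
      simp only [pvA_loop]
      split_ifs
      · rw [ih, show ([] ++ ["# " ++ l] : List String) = ["# " ++ l] from rfl, ih ["# " ++ l]]; simp
      · simp
      · exact ih acc

theorem pvA_loop_rev (R : List String) :
    (pvA_loop [] R).reverse = R.reverse.foldl pvB_step [] := by
  induction R with
  | nil => simp [pvA_loop]
  | cons l rest ih =>
      simp only [pvA_loop, List.reverse_cons, List.foldl_append, List.foldl_cons,
        List.foldl_nil, pvB_step]
      split_ifs with h1 h2
      · rw [pvA_loop_acc]; simp [ih]
      · simp
      · exact ih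

-- ===== VERDICT (by name: the statement is the Claim_ definition above) =====
theorem extract_tail_standardplots_output_spec : Claim_equal_extract_tail_standardplots_output := by
  intro s _
  show _ = _
  unfold extract_tail_standardplots_output extract_tail_standardplots_output_alt
  simp only [PySem.List.slice?_none_none_neg_one, Option.getD_some, List.reverse_append,
    List.reverse_singleton, List.singleton_append]
  rw [pvA_loop_rev, List.reverse_reverse]
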